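-- pv_equiv track=rewrite | github.com/rgutzen/DynVision | dynvision/workflow/workflow_utils.py | dict_poped
-- ===== SOURCE A (Python) =====
-- from typing import Dict, List, Optional, Union, Any
--
-- def dict_poped(d: Dict, keys: Union[str, List[str]]) -> Dict:
--     """
--     Create new dictionary with specified keys removed.
--
--     Args:
--         d: Input dictionary
--         keys: Key or list of keys to remove
--
--     Returns:
--         New dictionary without specified keys
--
--     Example:
--         >>> dict_poped({'a': 1, 'b': 2, 'c': 3}, ['a', 'c'])
--         {'b': 2}
--     """
--     dc = d.copy()
--     if isinstance(keys, list):
--         for key in keys: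
--             dc.pop(key, None)
--     else:
--         dc.pop(keys, None)
--     return dc
-- ===== SOURCE B (Python) =====
-- from typing import Dict, List, Union
--
-- def dict_poped(d: Dict, keys: Union[str, List[str]]) -> Dict:
--     """Create new dictionary with specified keys removed (one filtering pass)."""
--     keyset = set(keys) if isinstance(keys, list) else {keys}
--     return {k: v for k, v in d.items() if k not in keyset}
-- ===== Notes on version B (the rewrite author's own statement) =====
-- stated objective: idiomatic
-- what changed: Instead of copying the dict and popping each removal key, B normalises the keys into a set and builds the result in a single comprehension filtering d.items(), inverting what is iterated over.
import Mathlib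
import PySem

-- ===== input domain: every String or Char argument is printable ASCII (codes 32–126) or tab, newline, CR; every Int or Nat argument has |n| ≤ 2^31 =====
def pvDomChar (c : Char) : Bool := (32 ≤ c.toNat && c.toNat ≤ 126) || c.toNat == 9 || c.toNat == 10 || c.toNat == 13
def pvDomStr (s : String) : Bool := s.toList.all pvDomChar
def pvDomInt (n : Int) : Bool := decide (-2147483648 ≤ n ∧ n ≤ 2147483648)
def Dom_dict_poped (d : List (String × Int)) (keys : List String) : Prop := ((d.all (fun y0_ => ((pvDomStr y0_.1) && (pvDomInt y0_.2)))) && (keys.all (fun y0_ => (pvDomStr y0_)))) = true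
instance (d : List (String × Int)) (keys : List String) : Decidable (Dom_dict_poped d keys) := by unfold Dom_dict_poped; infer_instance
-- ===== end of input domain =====

-- B replaces copy-then-pop-each-key by one filtering pass over the items with the keys as a set (idiomatic rewrite; same cost).
-- ===== PORT A =====
-- dc = d.copy(); for key in keys: dc.pop(key, None); return dc
def dict_poped (d : List (String × Int)) (keys : List String) : List (String × Int) :=
  (keys.foldl (fun dc key => dc.erase key) (PySem.Dict.ofList d)).items

-- ===== PORT B =====
-- keyset = set(keys); return {k: v for k, v in d.items() if k not in keyset}
def dict_poped_alt (d : List (String × Int)) (keys : List String) : List (String × Int) :=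
  let keyset := PySem.Set.ofList keys
  (PySem.Dict.ofList d).items.filter (fun kv => !(keyset.contains kv.1))

-- ===== PRECONDITION & SPEC =====
def Spec_dict_poped (d : List (String × Int)) (keys : List String) (out : List (String × Int)) : Prop := out = dict_poped_alt d keys
instance (d : List (String × Int)) (keys : List String) (out : List (String × Int)) : Decidable (Spec_dict_poped d keys out) := by unfold Spec_dict_poped; infer_instance

-- ===== CLAIM (what is proved, stated in full; the proofs are below) =====
def Claim_equal_dict_poped : Prop := ∀ (d : List (String × Int)) (keys : List String), Dom_dict_poped d keys → Spec_dict_poped d keys (dict_poped d keys)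

-- ===== LEMMAS AND PROOFS =====


-- erase is a filter on the items list (definitional)
theorem items_erase (d : PySem.Dict String Int) (k : String) :
    (d.erase k).items = d.items.filter (fun p => !(p.1 == k)) := by
  cases d; rfl

-- a fold of erases over the keys filters the items once
theorem foldl_erase_items (keys : List String) (D : PySem.Dict String Int) :
    (keys.foldl (fun dc key => dc.erase key) D).items
      = D.items.filter (fun kv => !(keys.contains kv.1)) := by
  induction keys generalizing D with
  | nil => simp
  | cons k ks ih =>
      simp only [List.foldl_cons, ih, items_erase, List.filter_filter]
      apply List.filter_congr
      intro p _
      rw [Bool.and_comm, beq_eq_decide]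
      simp [eq_comm]

theorem contains_ofList_eq (keys : List String) (x : String) :
    (PySem.Set.ofList keys).contains x = keys.contains x := by
  simp [List.contains_eq_mem, PySem.Set.contains, PySem.Set.mem_ofList]

-- ===== VERDICT =====
theorem dict_poped_spec : Claim_equal_dict_poped := by
  intro d keys _
  unfold Spec_dict_poped dict_poped dict_poped_alt
  rw [foldl_erase_items]
  simp only [contains_ofList_eq]
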